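-- pv_equiv track=rewrite | github.com/rzamarefat/DAS-related | Udemy - Ace Coding Interview with 100 Algorithms Challenge in Python/45_Digit_Degree.py | find_digit_degree
-- ===== SOURCE A (Python) =====
-- def find_digit_degree(number):
--     data_holder = []
--     degree = 0
--     while True:
--         sum_ = 0
--         for char in str(number):
--             sum_ += int(char)
--
--         number = sum_
--
--         degree += 1
--
--         if len(str(number)) == 1:
--             break
--
--
--
--     return degree
-- ===== SOURCE B (Python) =====
-- def find_digit_degree(number):
--     def digit_sum(n):
--         s = 0
--         while n:
--             s += n % 10
--             n //= 10
--         return s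
--
--     s = digit_sum(number)
--     return 1 if s < 10 else 1 + find_digit_degree(s)
-- ===== Notes on version B (the rewrite author's own statement) =====
-- stated objective: alternative
-- what changed: Replaces A's unbounded while-loop over str()/int() character digit sums with a recursion on the additive-persistence recurrence whose digit sum is computed arithmetically with % and // (no string conversion).
import Mathlib
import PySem

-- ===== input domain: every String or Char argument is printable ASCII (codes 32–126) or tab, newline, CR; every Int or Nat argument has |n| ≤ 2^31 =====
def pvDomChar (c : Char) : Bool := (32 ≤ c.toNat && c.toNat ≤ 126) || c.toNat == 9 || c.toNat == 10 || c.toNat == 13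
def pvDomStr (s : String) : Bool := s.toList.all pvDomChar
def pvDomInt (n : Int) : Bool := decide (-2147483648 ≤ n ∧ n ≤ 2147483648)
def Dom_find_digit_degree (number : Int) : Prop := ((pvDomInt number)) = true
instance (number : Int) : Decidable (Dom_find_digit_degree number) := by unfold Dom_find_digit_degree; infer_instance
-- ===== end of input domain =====

-- B replaces A's unbounded while-loop over str()/int() character digit sums by a recursion on the
-- additive-persistence recurrence with an arithmetic (%-and-//) digit sum; return values proved equal
-- on all non-negative inputs (A raises ValueError on negatives).

-- ===== PORT A =====
-- one step of "for char in str(number): sum_ += int(char)"; none = ValueError (int('-'))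
def strDigitStep (acc : Option Int) (c : Char) : Option Int :=
  acc.bind fun s => (PySem.Int.ofStr? (String.mk [c])).map fun d => s + d

-- A's 'while True' loop; fuel is only a totality bound (never exhausted on inputs in Pre_);
-- the 'none' branch is Python's ValueError (outside Pre_)
def find_digit_degree_go : Nat → Int → Int → Int
  | 0, _, degree => degree
  | fuel+1, number, degree =>
    match (PySem.Int.toChars number).foldl strDigitStep (some 0) with
    | none => degree
    | some s =>
      if (PySem.Int.toChars s).length = 1 then degree + 1
      else find_digit_degree_go fuel s (degree + 1)

def find_digit_degree (number : Int) : Int :=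
  find_digit_degree_go (number.natAbs + 2) number 0

-- ===== PORT B =====
-- Source B's digit_sum: while n: s += n % 10; n //= 10  (fuel = totality bound, never exhausted for n ≥ 0)
def digit_sum_go : Nat → Int → Int → Int
  | 0, _, s => s
  | fuel+1, n, s =>
    if n = 0 then s
    else digit_sum_go fuel (PySem.Int.floordiv n 10) (s + PySem.Int.mod n 10)

def digit_sum (n : Int) : Int := digit_sum_go (n.natAbs + 1) n 0

-- Source B's recursion: 1 if s < 10 else 1 + find_digit_degree(s)
def find_digit_degree_alt_go : Nat → Int → Int
  | 0, _ => 1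
  | fuel+1, n =>
    let s := digit_sum n
    if s < 10 then 1 else 1 + find_digit_degree_alt_go fuel s

def find_digit_degree_alt (number : Int) : Int :=
  find_digit_degree_alt_go (number.natAbs + 1) number

-- ===== PRECONDITION & SPEC =====
-- A raises ValueError on every negative number (int('-')); Pre_ is exactly A's return domain.
def Pre_find_digit_degree (number : Int) : Prop := 0 ≤ number
instance (number : Int) : Decidable (Pre_find_digit_degree number) := by
  unfold Pre_find_digit_degree; infer_instance

def pvWitness_find_digit_degree : Int := (99)

def Spec_find_digit_degree (number : Int) (out : Int) : Prop := out = find_digit_degree_alt number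
instance (number : Int) (out : Int) : Decidable (Spec_find_digit_degree number out) := by
  unfold Spec_find_digit_degree; infer_instance

-- ===== CLAIM (what is proved, stated in full; the proofs are below) =====
def Claim_equal_find_digit_degree : Prop := ∀ (number : Int), Dom_find_digit_degree number → Pre_find_digit_degree number → Spec_find_digit_degree number (find_digit_degree number)

-- ===== LEMMAS AND PROOFS =====

-- canonical digit sum on Nat
def digitSum (m : Nat) : Nat :=
  if h : m = 0 then 0 else digitSum (m / 10) + m % 10
termination_by m
decreasing_by exact Nat.div_lt_self (Nat.pos_of_ne_zero h) (by norm_num)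

lemma digitSum_zero : digitSum 0 = 0 := by simp [digitSum]

lemma digitSum_eq (m : Nat) : digitSum m = digitSum (m / 10) + m % 10 := by
  rcases Nat.eq_zero_or_pos m with h | h
  · subst h; simp [digitSum_zero]
  · rw [digitSum]; simp [Nat.pos_iff_ne_zero.mp h]

lemma digitSum_of_lt_ten (m : Nat) (h : m < 10) : digitSum m = m := by
  rw [digitSum_eq, Nat.div_eq_of_lt h, digitSum_zero, Nat.mod_eq_of_lt h]
  omega

lemma digitSum_le (m : Nat) : digitSum m ≤ m := by
  induction m using Nat.strong_induction_on with
  | _ m ih =>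
    rcases Nat.eq_zero_or_pos m with h | h
    · subst h; simp [digitSum_zero]
    · rw [digitSum_eq]
      have := ih (m / 10) (Nat.div_lt_self h (by norm_num))
      omega

lemma digitSum_lt_self (m : Nat) (h : 10 ≤ m) : digitSum m < m := by
  rw [digitSum_eq]
  have := digitSum_le (m / 10)
  omega

-- canonical digit degree (the common value of both ports)
def deg (m : Nat) : Nat :=
  if h : digitSum m < 10 then 1 else 1 + deg (digitSum m)
termination_by m
decreasing_by
  have h10 : 10 ≤ m := by
    by_contra hc
    exact h (by rw [digitSum_of_lt_ten m (by omega)]; omega)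
  exact digitSum_lt_self m h10

lemma deg_of_lt (m : Nat) (h : digitSum m < 10) : deg m = 1 := by rw [deg, dif_pos h]

lemma deg_of_ge (m : Nat) (h : ¬ digitSum m < 10) : deg m = 1 + deg (digitSum m) := by
  rw [deg, dif_neg h]

-- A-side: int(char) on one decimal digit character
lemma ofStr_digitChar (d : Nat) (h : d < 10) :
    PySem.Int.ofStr? (String.mk [Nat.digitChar d]) = some (d : Int) := by
  interval_cases d <;> decide

-- A-side: the inner for-loop over Nat.toDigits computes digitSum
lemma foldA (m : Nat) : ∀ s : Int,
    (Nat.toDigits 10 m).foldl strDigitStep (some s) = some (s + (digitSum m : Int)) := by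
  induction m using Nat.strong_induction_on with
  | _ m ih =>
    intro s
    by_cases hm : m < 10
    · rw [Nat.toDigits_of_lt_base hm]
      simp [List.foldl, strDigitStep, ofStr_digitChar m hm, digitSum_of_lt_ten m hm]
    · rw [Nat.toDigits_of_base_le (b := 10) (by norm_num) (by omega), List.foldl_append,
        ih (m / 10) (Nat.div_lt_self (by omega) (by norm_num)) s]
      simp [List.foldl, strDigitStep, ofStr_digitChar (m % 10) (Nat.mod_lt m (by norm_num))]
      rw [digitSum_eq m]
      push_cast
      ring

lemma sumA (n : Int) (h : 0 ≤ n) :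
    (PySem.Int.toChars n).foldl strDigitStep (some 0) = some ((digitSum n.toNat : Nat) : Int) := by
  have : PySem.Int.toChars n = Nat.toDigits 10 n.toNat := by
    simp [PySem.Int.toChars, not_lt.mpr h]
  rw [this, foldA, zero_add]

lemma len_toDigits_eq_one (k : Nat) : (Nat.toDigits 10 k).length = 1 ↔ k < 10 := by
  have h1 : (Nat.toDigits 10 k).length ≤ 1 ↔ k < 10 ^ 1 :=
    Nat.length_toDigits_le_iff (by norm_num) (by norm_num)
  have h2 : 0 < (Nat.toDigits 10 k).length := Nat.length_toDigits_pos
  simp only [pow_one] at h1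
  omega

lemma loopA (fuel : Nat) : ∀ (n d : Int), 0 ≤ n → n.toNat < fuel →
    find_digit_degree_go fuel n d = d + (deg n.toNat : Int) := by
  induction fuel with
  | zero => intro n d h1 h2; omega
  | succ f ih =>
    intro n d h1 h2
    simp only [find_digit_degree_go, sumA n h1]
    have hchars : PySem.Int.toChars ((digitSum n.toNat : Nat) : Int)
        = Nat.toDigits 10 (digitSum n.toNat) := by
      simp [PySem.Int.toChars]
    rw [hchars]
    by_cases h10 : digitSum n.toNat < 10
    · rw [if_pos ((len_toDigits_eq_one _).mpr h10), deg_of_lt n.toNat h10]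
      norm_num
    · rw [if_neg (by rw [len_toDigits_eq_one]; exact h10)]
      have hge : 10 ≤ n.toNat := by
        by_contra hc
        exact h10 (by rw [digitSum_of_lt_ten n.toNat (by omega)]; omega)
      have hlt : ((digitSum n.toNat : Nat) : Int).toNat < f := by
        have := digitSum_lt_self n.toNat hge
        omega
      rw [ih _ (d + 1) (by positivity) hlt, deg_of_ge n.toNat h10]
      have : ((digitSum n.toNat : Nat) : Int).toNat = digitSum n.toNat := by omega
      rw [this]
      push_cast
      ring

-- B-side: digit_sum computes digitSum
lemma loopDS (fuel : Nat) : ∀ (n s : Int), 0 ≤ n → n.toNat < fuel →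
    digit_sum_go fuel n s = s + (digitSum n.toNat : Nat) := by
  induction fuel with
  | zero => intro n s h1 h2; omega
  | succ f ih =>
    intro n s h1 h2
    simp only [digit_sum_go]
    by_cases hz : n = 0
    · rw [if_pos hz, hz]
      simp [digitSum_zero]
    · rw [if_neg hz, PySem.Int.floordiv_eq_ediv_of_pos (by norm_num),
        PySem.Int.mod_eq_emod_of_pos (by norm_num),
        ih (n / 10) _ (by omega) (by omega)]
      have h1' : (n / 10).toNat = n.toNat / 10 := by omega
      have h2' : n % 10 = ((n.toNat % 10 : Nat) : Int) := by omega
      rw [h1', h2', digitSum_eq n.toNat]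
      push_cast
      ring

lemma digit_sum_eq (n : Int) (h : 0 ≤ n) : digit_sum n = ((digitSum n.toNat : Nat) : Int) := by
  rw [digit_sum, loopDS (n.natAbs + 1) n 0 h (by omega), zero_add]

lemma loopB (fuel : Nat) : ∀ (n : Int), 0 ≤ n → n.toNat < fuel →
    find_digit_degree_alt_go fuel n = (deg n.toNat : Int) := by
  induction fuel with
  | zero => intro n h1 h2; omega
  | succ f ih =>
    intro n h1 h2
    simp only [find_digit_degree_alt_go, digit_sum_eq n h1]
    by_cases h10 : digitSum n.toNat < 10
    · rw [if_pos (by exact_mod_cast h10), deg_of_lt n.toNat h10]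
      norm_num
    · rw [if_neg (by exact_mod_cast h10)]
      have hge : 10 ≤ n.toNat := by
        by_contra hc
        exact h10 (by rw [digitSum_of_lt_ten n.toNat (by omega)]; omega)
      have hlt : ((digitSum n.toNat : Nat) : Int).toNat < f := by
        have := digitSum_lt_self n.toNat hge
        omega
      rw [ih _ (by positivity) hlt, deg_of_ge n.toNat h10]
      have : ((digitSum n.toNat : Nat) : Int).toNat = digitSum n.toNat := by omega
      rw [this]
      push_cast
      ring

-- ===== VERDICT (by name: the statement is the Claim_ definition above) =====
theorem find_digit_degree_spec : Claim_equal_find_digit_degree := by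
  intro number _ hpre
  unfold Spec_find_digit_degree find_digit_degree find_digit_degree_alt
  rw [loopA _ number 0 hpre (by omega), loopB _ number hpre (by omega), zero_add]
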